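-- pv_equiv track=rewrite | github.com/onlyfeng/engram | scripts/ci/mypy_metrics.py | aggregate_by_directory
-- ===== SOURCE A (Python) =====
-- DIRECTORY_PREFIXES = [
--     "src/engram/gateway/",
--     "src/engram/logbook/",
--     "src/engram/",
--     "tests/",
--     "scripts/",
-- ]
--
-- def aggregate_by_directory(
--     errors_by_file: dict[str, int], notes_by_file: dict[str, int]
-- ) -> dict[str, dict[str, int]]:
--     """按目录前缀聚合统计"""
--     result: dict[str, dict[str, int]] = {}
--
--     for prefix in DIRECTORY_PREFIXES:
--         errors = sum(count for f, count in errors_by_file.items() if f.startswith(prefix))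
--         notes = sum(count for f, count in notes_by_file.items() if f.startswith(prefix))
--         if errors > 0 or notes > 0:
--             result[prefix] = {"errors": errors, "notes": notes}
--
--     # 统计未分类的文件（不匹配任何前缀）
--     other_errors = 0
--     other_notes = 0
--     for f, count in errors_by_file.items():
--         if not any(f.startswith(p) for p in DIRECTORY_PREFIXES):
--             other_errors += count
--     for f, count in notes_by_file.items():
--         if not any(f.startswith(p) for p in DIRECTORY_PREFIXES):
--             other_notes += count
--
--     if other_errors > 0 or other_notes > 0:
--         result["other"] = {"errors": other_errors, "notes": other_notes}
--
--     return result
-- ===== SOURCE B (Python) =====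
-- DIRECTORY_PREFIXES = [
--     "src/engram/gateway/",
--     "src/engram/logbook/",
--     "src/engram/",
--     "tests/",
--     "scripts/",
-- ]
--
--
-- def _accumulate(acc, counts, key):
--     """Add each file's count to every matching prefix bucket (prefixes overlap,
--     so no break), or to 'other' when no prefix matches."""
--     for f, count in counts.items():
--         matched = False
--         for p in DIRECTORY_PREFIXES:
--             if f.startswith(p):
--                 acc[p][key] += count
--                 matched = True
--         if not matched:
--             acc["other"][key] += count
--
--
-- def aggregate_by_directory(errors_by_file, notes_by_file):
--     acc = {p: {"errors": 0, "notes": 0} for p in DIRECTORY_PREFIXES}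
--     acc["other"] = {"errors": 0, "notes": 0}
--     _accumulate(acc, errors_by_file, "errors")
--     _accumulate(acc, notes_by_file, "notes")
--     return {p: c for p, c in acc.items() if c["errors"] > 0 or c["notes"] > 0}
-- ===== Notes on version B (the rewrite author's own statement) =====
-- stated objective: faster
-- what changed: Instead of re-scanning both dicts once per directory prefix plus two extra unmatched-file scans, B makes a single accumulating pass over each dict, adding every file's count to each matching prefix bucket (or 'other') in one pre-seeded bucket dict, then emits the non-zero buckets in prefix order.
import Mathlib
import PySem

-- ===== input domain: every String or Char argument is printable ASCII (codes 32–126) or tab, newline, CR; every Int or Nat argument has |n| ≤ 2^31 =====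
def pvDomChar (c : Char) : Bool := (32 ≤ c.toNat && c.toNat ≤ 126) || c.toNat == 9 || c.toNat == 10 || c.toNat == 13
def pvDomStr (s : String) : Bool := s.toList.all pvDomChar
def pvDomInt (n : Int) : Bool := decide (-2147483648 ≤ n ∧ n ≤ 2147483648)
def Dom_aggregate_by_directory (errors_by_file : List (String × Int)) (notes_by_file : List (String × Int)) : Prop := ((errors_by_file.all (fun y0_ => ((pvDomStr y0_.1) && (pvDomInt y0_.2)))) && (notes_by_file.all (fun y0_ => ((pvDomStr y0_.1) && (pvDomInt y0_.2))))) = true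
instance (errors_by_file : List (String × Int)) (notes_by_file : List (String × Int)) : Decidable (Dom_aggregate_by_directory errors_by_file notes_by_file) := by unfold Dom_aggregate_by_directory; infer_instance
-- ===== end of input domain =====

-- B replaces A's seven full scans of the two dicts (one per prefix plus the unmatched scans)
-- by a single accumulating pass over each dict into one prefix-keyed bucket dict
-- (constant-factor speedup; measured faster in a timing run).


-- ===== PORT A =====
def pvPrefixes : List String :=
  ["src/engram/gateway/", "src/engram/logbook/", "src/engram/", "tests/", "scripts/"]

def aggregate_by_directory (errors_by_file : List (String × Int)) (notes_by_file : List (String × Int)) : List (String × List (String × Int)) :=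
  let result : PySem.Dict String (PySem.Dict String Int) :=
    pvPrefixes.foldl (fun result prefix_ =>
      let errors := errors_by_file.foldl (fun s fc => if PySem.Str.startswith fc.1 prefix_ then s + fc.2 else s) 0
      let notes := notes_by_file.foldl (fun s fc => if PySem.Str.startswith fc.1 prefix_ then s + fc.2 else s) 0
      if errors > 0 ∨ notes > 0 then
        result.insert prefix_ ((PySem.Dict.empty.insert "errors" errors).insert "notes" notes)
      else result) PySem.Dict.empty
  let other_errors := errors_by_file.foldl (fun s fc => if !(pvPrefixes.any fun p => PySem.Str.startswith fc.1 p) then s + fc.2 else s) 0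
  let other_notes := notes_by_file.foldl (fun s fc => if !(pvPrefixes.any fun p => PySem.Str.startswith fc.1 p) then s + fc.2 else s) 0
  let result := if other_errors > 0 ∨ other_notes > 0 then
      result.insert "other" ((PySem.Dict.empty.insert "errors" other_errors).insert "notes" other_notes)
    else result
  result.items.map (fun kv => (kv.1, kv.2.items))

-- ===== PORT B =====
-- _accumulate: one pass over counts; each (f, count) is added to every matching prefix
-- bucket (no break), or to "other" when no prefix matches.  acc[p][key] += count is
-- Dict.modify p then Dict.modify key (defaults are never used: all keys are pre-seeded).
def pvAccStep (acc : PySem.Dict String (PySem.Dict String Int)) (fc : String × Int) (key : String) : PySem.Dict String (PySem.Dict String Int) :=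
  let st := pvPrefixes.foldl (fun (st : PySem.Dict String (PySem.Dict String Int) × Bool) p =>
      if PySem.Str.startswith fc.1 p then
        (st.1.modify p PySem.Dict.empty (fun inner => inner.modify key 0 (· + fc.2)), true)
      else st) (acc, false)
  if st.2 then st.1
  else st.1.modify "other" PySem.Dict.empty (fun inner => inner.modify key 0 (· + fc.2))

def pvAccumulate (acc : PySem.Dict String (PySem.Dict String Int)) (counts : List (String × Int)) (key : String) : PySem.Dict String (PySem.Dict String Int) :=
  counts.foldl (fun acc fc => pvAccStep acc fc key) acc

def aggregate_by_directory_alt (errors_by_file : List (String × Int)) (notes_by_file : List (String × Int)) : List (String × List (String × Int)) :=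
  let acc : PySem.Dict String (PySem.Dict String Int) :=
    pvPrefixes.foldl (fun d p => d.insert p ((PySem.Dict.empty.insert "errors" (0 : Int)).insert "notes" (0 : Int))) PySem.Dict.empty
  let acc := acc.insert "other" ((PySem.Dict.empty.insert "errors" (0 : Int)).insert "notes" (0 : Int))
  let acc := pvAccumulate acc errors_by_file "errors"
  let acc := pvAccumulate acc notes_by_file "notes"
  let result : PySem.Dict String (PySem.Dict String Int) :=
    acc.items.foldl (fun r pc =>
      if pc.2.getD "errors" 0 > 0 ∨ pc.2.getD "notes" 0 > 0 then r.insert pc.1 pc.2 else r) PySem.Dict.empty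
  result.items.map (fun kv => (kv.1, kv.2.items))

-- ===== PRECONDITION & SPEC =====
def Spec_aggregate_by_directory (errors_by_file : List (String × Int)) (notes_by_file : List (String × Int)) (out : List (String × List (String × Int))) : Prop := out = aggregate_by_directory_alt errors_by_file notes_by_file
instance (errors_by_file : List (String × Int)) (notes_by_file : List (String × Int)) (out : List (String × List (String × Int))) : Decidable (Spec_aggregate_by_directory errors_by_file notes_by_file out) := by unfold Spec_aggregate_by_directory; infer_instance

-- ===== CLAIM (what is proved, stated in full; the proofs are below) =====
def Claim_equal_aggregate_by_directory : Prop := ∀ (errors_by_file : List (String × Int)) (notes_by_file : List (String × Int)), Dom_aggregate_by_directory errors_by_file notes_by_file → Spec_aggregate_by_directory errors_by_file notes_by_file (aggregate_by_directory errors_by_file notes_by_file)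

-- ===== LEMMAS AND PROOFS =====

-- the per-prefix sum and the unmatched ("other") sum of an association list
def pvS (p : String) (xs : List (String × Int)) : Int :=
  ((xs.filter (fun fc => PySem.Str.startswith fc.1 p)).map (·.2)).sum
def pvSO (xs : List (String × Int)) : Int :=
  ((xs.filter (fun fc => !(pvPrefixes.any fun p => PySem.Str.startswith fc.1 p))).map (·.2)).sum

-- the accumulator is always a literal 6-key dict of 2-key dicts over 12 integers
def pvInner (a b : Int) : PySem.Dict String Int :=
  (PySem.Dict.empty.insert "errors" a).insert "notes" b
def pvAcc (a1 b1 a2 b2 a3 b3 a4 b4 a5 b5 a6 b6 : Int) : PySem.Dict String (PySem.Dict String Int) :=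
  (((((PySem.Dict.empty.insert "src/engram/gateway/" (pvInner a1 b1)).insert "src/engram/logbook/" (pvInner a2 b2)).insert "src/engram/" (pvInner a3 b3)).insert "tests/" (pvInner a4 b4)).insert "scripts/" (pvInner a5 b5)).insert "other" (pvInner a6 b6)

theorem pvS_cons (p : String) (x : String × Int) (xs : List (String × Int)) :
    pvS p (x :: xs) = (if PySem.Str.startswith x.1 p then x.2 else 0) + pvS p xs := by
  cases h : PySem.Str.startswith x.1 p <;> simp only [pvS, List.filter_cons, h] <;> simp

theorem pvSO_cons (x : String × Int) (xs : List (String × Int)) :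
    pvSO (x :: xs) = (if !(pvPrefixes.any fun p => PySem.Str.startswith x.1 p) then x.2 else 0) + pvSO xs := by
  cases h : (pvPrefixes.any fun p => PySem.Str.startswith x.1 p) <;> simp only [pvSO, List.filter_cons, h] <;> simp

theorem pvSumFold (c : String × Int → Bool) (xs : List (String × Int)) (a : Int) :
    xs.foldl (fun s fc => if c fc then s + fc.2 else s) a = a + ((xs.filter c).map (·.2)).sum := by
  induction xs generalizing a with
  | nil => simp
  | cons x xs ih =>
    by_cases h : c x = true <;> simp [List.foldl_cons, h, ih] <;> ring


-- 12 single-slot update facts about the literal accumulator (kernel computations)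
theorem pvModE1 (a1 b1 a2 b2 a3 b3 a4 b4 a5 b5 a6 b6 c : Int) : (pvAcc a1 b1 a2 b2 a3 b3 a4 b4 a5 b5 a6 b6).modify "src/engram/gateway/" PySem.Dict.empty (fun inner => inner.modify "errors" 0 (· + c)) = pvAcc (a1 + c) b1 a2 b2 a3 b3 a4 b4 a5 b5 a6 b6 := rfl
theorem pvModE2 (a1 b1 a2 b2 a3 b3 a4 b4 a5 b5 a6 b6 c : Int) : (pvAcc a1 b1 a2 b2 a3 b3 a4 b4 a5 b5 a6 b6).modify "src/engram/logbook/" PySem.Dict.empty (fun inner => inner.modify "errors" 0 (· + c)) = pvAcc a1 b1 (a2 + c) b2 a3 b3 a4 b4 a5 b5 a6 b6 := rfl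
theorem pvModE3 (a1 b1 a2 b2 a3 b3 a4 b4 a5 b5 a6 b6 c : Int) : (pvAcc a1 b1 a2 b2 a3 b3 a4 b4 a5 b5 a6 b6).modify "src/engram/" PySem.Dict.empty (fun inner => inner.modify "errors" 0 (· + c)) = pvAcc a1 b1 a2 b2 (a3 + c) b3 a4 b4 a5 b5 a6 b6 := rfl
theorem pvModE4 (a1 b1 a2 b2 a3 b3 a4 b4 a5 b5 a6 b6 c : Int) : (pvAcc a1 b1 a2 b2 a3 b3 a4 b4 a5 b5 a6 b6).modify "tests/" PySem.Dict.empty (fun inner => inner.modify "errors" 0 (· + c)) = pvAcc a1 b1 a2 b2 a3 b3 (a4 + c) b4 a5 b5 a6 b6 := rfl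
theorem pvModE5 (a1 b1 a2 b2 a3 b3 a4 b4 a5 b5 a6 b6 c : Int) : (pvAcc a1 b1 a2 b2 a3 b3 a4 b4 a5 b5 a6 b6).modify "scripts/" PySem.Dict.empty (fun inner => inner.modify "errors" 0 (· + c)) = pvAcc a1 b1 a2 b2 a3 b3 a4 b4 (a5 + c) b5 a6 b6 := rfl
theorem pvModE6 (a1 b1 a2 b2 a3 b3 a4 b4 a5 b5 a6 b6 c : Int) : (pvAcc a1 b1 a2 b2 a3 b3 a4 b4 a5 b5 a6 b6).modify "other" PySem.Dict.empty (fun inner => inner.modify "errors" 0 (· + c)) = pvAcc a1 b1 a2 b2 a3 b3 a4 b4 a5 b5 (a6 + c) b6 := rfl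
theorem pvModN1 (a1 b1 a2 b2 a3 b3 a4 b4 a5 b5 a6 b6 c : Int) : (pvAcc a1 b1 a2 b2 a3 b3 a4 b4 a5 b5 a6 b6).modify "src/engram/gateway/" PySem.Dict.empty (fun inner => inner.modify "notes" 0 (· + c)) = pvAcc a1 (b1 + c) a2 b2 a3 b3 a4 b4 a5 b5 a6 b6 := rfl
theorem pvModN2 (a1 b1 a2 b2 a3 b3 a4 b4 a5 b5 a6 b6 c : Int) : (pvAcc a1 b1 a2 b2 a3 b3 a4 b4 a5 b5 a6 b6).modify "src/engram/logbook/" PySem.Dict.empty (fun inner => inner.modify "notes" 0 (· + c)) = pvAcc a1 b1 a2 (b2 + c) a3 b3 a4 b4 a5 b5 a6 b6 := rfl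
theorem pvModN3 (a1 b1 a2 b2 a3 b3 a4 b4 a5 b5 a6 b6 c : Int) : (pvAcc a1 b1 a2 b2 a3 b3 a4 b4 a5 b5 a6 b6).modify "src/engram/" PySem.Dict.empty (fun inner => inner.modify "notes" 0 (· + c)) = pvAcc a1 b1 a2 b2 a3 (b3 + c) a4 b4 a5 b5 a6 b6 := rfl
theorem pvModN4 (a1 b1 a2 b2 a3 b3 a4 b4 a5 b5 a6 b6 c : Int) : (pvAcc a1 b1 a2 b2 a3 b3 a4 b4 a5 b5 a6 b6).modify "tests/" PySem.Dict.empty (fun inner => inner.modify "notes" 0 (· + c)) = pvAcc a1 b1 a2 b2 a3 b3 a4 (b4 + c) a5 b5 a6 b6 := rfl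
theorem pvModN5 (a1 b1 a2 b2 a3 b3 a4 b4 a5 b5 a6 b6 c : Int) : (pvAcc a1 b1 a2 b2 a3 b3 a4 b4 a5 b5 a6 b6).modify "scripts/" PySem.Dict.empty (fun inner => inner.modify "notes" 0 (· + c)) = pvAcc a1 b1 a2 b2 a3 b3 a4 b4 a5 (b5 + c) a6 b6 := rfl
theorem pvModN6 (a1 b1 a2 b2 a3 b3 a4 b4 a5 b5 a6 b6 c : Int) : (pvAcc a1 b1 a2 b2 a3 b3 a4 b4 a5 b5 a6 b6).modify "other" PySem.Dict.empty (fun inner => inner.modify "notes" 0 (· + c)) = pvAcc a1 b1 a2 b2 a3 b3 a4 b4 a5 b5 a6 (b6 + c) := rfl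

set_option maxHeartbeats 1000000 in
theorem pvStepE (fc : String × Int) (a1 b1 a2 b2 a3 b3 a4 b4 a5 b5 a6 b6 : Int) :
    pvAccStep (pvAcc a1 b1 a2 b2 a3 b3 a4 b4 a5 b5 a6 b6) fc "errors" =
      pvAcc (a1 + if PySem.Str.startswith fc.1 "src/engram/gateway/" then fc.2 else 0) b1
            (a2 + if PySem.Str.startswith fc.1 "src/engram/logbook/" then fc.2 else 0) b2
            (a3 + if PySem.Str.startswith fc.1 "src/engram/" then fc.2 else 0) b3
            (a4 + if PySem.Str.startswith fc.1 "tests/" then fc.2 else 0) b4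
            (a5 + if PySem.Str.startswith fc.1 "scripts/" then fc.2 else 0) b5
            (a6 + if !(pvPrefixes.any fun p => PySem.Str.startswith fc.1 p) then fc.2 else 0) b6 := by
  cases h1 : PySem.Str.startswith fc.1 "src/engram/gateway/" <;>
  cases h2 : PySem.Str.startswith fc.1 "src/engram/logbook/" <;>
  cases h3 : PySem.Str.startswith fc.1 "src/engram/" <;>
  cases h4 : PySem.Str.startswith fc.1 "tests/" <;>
  cases h5 : PySem.Str.startswith fc.1 "scripts/" <;>
  (simp only [pvAccStep, pvPrefixes, List.foldl_cons, List.foldl_nil, List.any_cons,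
              List.any_nil, h1, h2, h3, h4, h5];
   simp [pvModE1, pvModE2, pvModE3, pvModE4, pvModE5, pvModE6])

set_option maxHeartbeats 1000000 in
theorem pvStepN (fc : String × Int) (a1 b1 a2 b2 a3 b3 a4 b4 a5 b5 a6 b6 : Int) :
    pvAccStep (pvAcc a1 b1 a2 b2 a3 b3 a4 b4 a5 b5 a6 b6) fc "notes" =
      pvAcc a1 (b1 + if PySem.Str.startswith fc.1 "src/engram/gateway/" then fc.2 else 0)
            a2 (b2 + if PySem.Str.startswith fc.1 "src/engram/logbook/" then fc.2 else 0)
            a3 (b3 + if PySem.Str.startswith fc.1 "src/engram/" then fc.2 else 0)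
            a4 (b4 + if PySem.Str.startswith fc.1 "tests/" then fc.2 else 0)
            a5 (b5 + if PySem.Str.startswith fc.1 "scripts/" then fc.2 else 0)
            a6 (b6 + if !(pvPrefixes.any fun p => PySem.Str.startswith fc.1 p) then fc.2 else 0) := by
  cases h1 : PySem.Str.startswith fc.1 "src/engram/gateway/" <;>
  cases h2 : PySem.Str.startswith fc.1 "src/engram/logbook/" <;>
  cases h3 : PySem.Str.startswith fc.1 "src/engram/" <;>
  cases h4 : PySem.Str.startswith fc.1 "tests/" <;>
  cases h5 : PySem.Str.startswith fc.1 "scripts/" <;>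
  (simp only [pvAccStep, pvPrefixes, List.foldl_cons, List.foldl_nil, List.any_cons,
              List.any_nil, h1, h2, h3, h4, h5];
   simp [pvModN1, pvModN2, pvModN3, pvModN4, pvModN5, pvModN6])

theorem pvAccE (xs : List (String × Int)) (a1 b1 a2 b2 a3 b3 a4 b4 a5 b5 a6 b6 : Int) :
    pvAccumulate (pvAcc a1 b1 a2 b2 a3 b3 a4 b4 a5 b5 a6 b6) xs "errors" =
      pvAcc (a1 + pvS "src/engram/gateway/" xs) b1 (a2 + pvS "src/engram/logbook/" xs) b2
            (a3 + pvS "src/engram/" xs) b3 (a4 + pvS "tests/" xs) b4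
            (a5 + pvS "scripts/" xs) b5 (a6 + pvSO xs) b6 := by
  induction xs generalizing a1 b1 a2 b2 a3 b3 a4 b4 a5 b5 a6 b6 with
  | nil => simp [pvAccumulate, pvS, pvSO]
  | cons x xs ih =>
    rw [show pvAccumulate (pvAcc a1 b1 a2 b2 a3 b3 a4 b4 a5 b5 a6 b6) (x :: xs) "errors"
          = pvAccumulate (pvAccStep (pvAcc a1 b1 a2 b2 a3 b3 a4 b4 a5 b5 a6 b6) x "errors") xs "errors" from rfl,
        pvStepE, ih, pvS_cons, pvS_cons, pvS_cons, pvS_cons, pvS_cons, pvSO_cons]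
    simp [add_assoc]

theorem pvAccN (xs : List (String × Int)) (a1 b1 a2 b2 a3 b3 a4 b4 a5 b5 a6 b6 : Int) :
    pvAccumulate (pvAcc a1 b1 a2 b2 a3 b3 a4 b4 a5 b5 a6 b6) xs "notes" =
      pvAcc a1 (b1 + pvS "src/engram/gateway/" xs) a2 (b2 + pvS "src/engram/logbook/" xs)
            a3 (b3 + pvS "src/engram/" xs) a4 (b4 + pvS "tests/" xs)
            a5 (b5 + pvS "scripts/" xs) a6 (b6 + pvSO xs) := by
  induction xs generalizing a1 b1 a2 b2 a3 b3 a4 b4 a5 b5 a6 b6 with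
  | nil => simp [pvAccumulate, pvS, pvSO]
  | cons x xs ih =>
    rw [show pvAccumulate (pvAcc a1 b1 a2 b2 a3 b3 a4 b4 a5 b5 a6 b6) (x :: xs) "notes"
          = pvAccumulate (pvAccStep (pvAcc a1 b1 a2 b2 a3 b3 a4 b4 a5 b5 a6 b6) x "notes") xs "notes" from rfl,
        pvStepN, ih, pvS_cons, pvS_cons, pvS_cons, pvS_cons, pvS_cons, pvSO_cons]
    simp [add_assoc]

theorem pvInit :
    (pvPrefixes.foldl (fun d p => d.insert p ((PySem.Dict.empty.insert "errors" (0 : Int)).insert "notes" (0 : Int))) PySem.Dict.empty).insert "other" ((PySem.Dict.empty.insert "errors" (0 : Int)).insert "notes" (0 : Int))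
      = pvAcc 0 0 0 0 0 0 0 0 0 0 0 0 := rfl
theorem pvAcc_items (a1 b1 a2 b2 a3 b3 a4 b4 a5 b5 a6 b6 : Int) :
    (pvAcc a1 b1 a2 b2 a3 b3 a4 b4 a5 b5 a6 b6).items =
      [("src/engram/gateway/", pvInner a1 b1), ("src/engram/logbook/", pvInner a2 b2), ("src/engram/", pvInner a3 b3), ("tests/", pvInner a4 b4), ("scripts/", pvInner a5 b5), ("other", pvInner a6 b6)] := rfl
theorem pvInner_errors (a b : Int) : (pvInner a b).getD "errors" 0 = a := rfl
theorem pvInner_notes (a b : Int) : (pvInner a b).getD "notes" 0 = b := rfl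

-- ===== VERDICT (by name: the statement is the Claim_ definition above) =====
set_option maxHeartbeats 1600000 in
theorem aggregate_by_directory_spec : Claim_equal_aggregate_by_directory := by
  intro e n _
  unfold Spec_aggregate_by_directory aggregate_by_directory aggregate_by_directory_alt
  simp only [pvInit, pvAccE, pvAccN, zero_add]
  simp only [pvAcc_items, List.foldl_cons, List.foldl_nil, pvInner_errors, pvInner_notes]
  simp only [pvS, pvSO]
  simp only [pvSumFold, zero_add]
  simp only [pvPrefixes, List.foldl_cons, List.foldl_nil]
  split_ifs <;> rfl
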